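-- pv_equiv track=rewrite | github.com/AmelishkoIra/it-academy-summer-2021 | src/task1_hw2.py | round_numbers
-- ===== SOURCE A (Python) =====
-- def round_numbers(number):
--     """ Функция определяет, сколько кругляшей в числе """
--     round_number = 0
--     for i in number:
--         if i == "8":
--             round_number = round_number + 2
--         elif i == "0" or i == "6" or i == "9":
--             round_number = round_number + 1
--     return round_number
-- ===== SOURCE B (Python) =====
-- def round_numbers(number):
--     """ Функция определяет, сколько кругляшей в числе """
--     return (number.count("0") + number.count("6")
--             + number.count("9") + 2 * number.count("8"))
-- ===== Notes on version B (the rewrite author's own statement) =====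
-- stated objective: idiomatic
-- what changed: Replaces the single branching accumulator loop with direct str.count passes summed with hole weights (0/6/9 weigh 1, 8 weighs 2).
import Mathlib
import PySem

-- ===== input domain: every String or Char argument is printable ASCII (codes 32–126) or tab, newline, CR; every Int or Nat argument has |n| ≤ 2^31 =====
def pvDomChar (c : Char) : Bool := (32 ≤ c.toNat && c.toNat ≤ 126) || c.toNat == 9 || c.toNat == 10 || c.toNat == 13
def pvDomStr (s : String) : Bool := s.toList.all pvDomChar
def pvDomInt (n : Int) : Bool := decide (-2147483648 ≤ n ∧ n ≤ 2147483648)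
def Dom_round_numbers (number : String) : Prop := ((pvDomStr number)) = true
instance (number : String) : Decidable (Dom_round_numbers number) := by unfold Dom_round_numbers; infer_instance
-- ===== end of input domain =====

-- B replaces A's branching accumulator loop by independent str.count passes (idiomatic).

-- ===== PORT A =====
-- literal port: one fold over the characters with the same branch structure
def round_numbers (number : String) : Int :=
  number.toList.foldl
    (fun round_number i =>
      if i == '8' then round_number + 2
      else if i == '0' || i == '6' || i == '9' then round_number + 1
      else round_number) 0

-- ===== PORT B =====
-- literal port of Source B: sum of str.count passes
def round_numbers_alt (number : String) : Int :=
  (PySem.Str.count number "0" : Int) + (PySem.Str.count number "6" : Int)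
    + (PySem.Str.count number "9" : Int) + 2 * (PySem.Str.count number "8" : Int)

-- ===== PRECONDITION & SPEC =====
def Spec_round_numbers (number : String) (out : Int) : Prop := out = round_numbers_alt number
instance (number : String) (out : Int) : Decidable (Spec_round_numbers number out) := by unfold Spec_round_numbers; infer_instance

-- ===== CLAIM (what is proved, stated in full; the proofs are below) =====
def Claim_equal_round_numbers : Prop := ∀ (number : String), Dom_round_numbers number → Spec_round_numbers number (round_numbers number)

-- ===== LEMMAS AND PROOFS =====

-- count.go with a single-character needle counts occurrences of that character
theorem count_go_singleton (c : Char) :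
    ∀ (fuel : Nat) (l : List Char) (acc : Nat), l.length ≤ fuel →
      PySem.Chars.count.go [c] fuel l acc = acc + l.count c := by
  intro fuel
  induction fuel with
  | zero =>
    intro l acc h
    have : l = [] := List.eq_nil_of_length_eq_zero (Nat.le_zero.mp h)
    subst this
    simp [PySem.Chars.count.go]
  | succ n ih =>
    intro l acc h
    cases l with
    | nil => simp [PySem.Chars.count.go]
    | cons x t =>
      simp only [PySem.Chars.count.go]
      by_cases hx : c = x
      · subst hx
        have hp : [c].isPrefixOf (c :: t) = true := by simp [List.isPrefixOf]
        simp only [hp, if_true, List.length_cons, List.drop_succ_cons,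
          List.length_nil, List.drop_zero]
        rw [ih t (acc + 1) (Nat.le_of_succ_le_succ h)]
        simp
        omega
      · have hp : [c].isPrefixOf (x :: t) = false := by
          simp [List.isPrefixOf, hx]
        simp only [hp, Bool.false_eq_true, if_false]
        rw [ih t acc (Nat.le_of_succ_le_succ h)]
        simp [Ne.symm hx]

theorem str_count_singleton (s : String) (c : Char) :
    PySem.Str.count s (String.ofList [c]) = s.toList.count c := by
  have h : PySem.Str.count s (String.ofList [c]) = PySem.Chars.count s.toList [c] := by
    simp [PySem.Str.count]
  rw [h]
  unfold PySem.Chars.count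
  simp only [List.isEmpty_cons]
  simpa using count_go_singleton c s.toList.length s.toList 0 (le_refl _)

-- A's fold in terms of character counts
theorem foldl_counts (l : List Char) (a : Int) :
    l.foldl
      (fun round_number i =>
        if i == '8' then round_number + 2
        else if i == '0' || i == '6' || i == '9' then round_number + 1
        else round_number) a
    = a + (l.count '0' : Int) + (l.count '6' : Int) + (l.count '9' : Int)
        + 2 * (l.count '8' : Int) := by
  induction l generalizing a with
  | nil => simp
  | cons x t ih =>
    simp only [List.foldl_cons, List.count_cons]
    rw [ih]
    by_cases h8 : x = '8'
    · subst h8; simp; ring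
    · by_cases h0 : x = '0'
      · subst h0; simp; ring
      · by_cases h6 : x = '6'
        · subst h6; simp; ring
        · by_cases h9 : x = '9'
          · subst h9; simp; ring
          · simp [h8, h0, h6, h9]

-- ===== VERDICT (by name: the statement is the Claim_ definition above) =====
theorem round_numbers_spec : Claim_equal_round_numbers := by
  intro number _
  unfold Spec_round_numbers round_numbers round_numbers_alt
  rw [foldl_counts]
  have h0 := str_count_singleton number '0'
  have h6 := str_count_singleton number '6'
  have h9 := str_count_singleton number '9'
  have h8 := str_count_singleton number '8'
  simp only [show ("0" : String) = String.ofList ['0'] from rfl,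
    show ("6" : String) = String.ofList ['6'] from rfl,
    show ("9" : String) = String.ofList ['9'] from rfl,
    show ("8" : String) = String.ofList ['8'] from rfl, h0, h6, h9, h8]
  ring
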